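-- pv_equiv track=rewrite | github.com/easternpillar/AlgorithmTraining | Programmers/Coding Test Practice/Summer & Winter Coding(2019)/Level 3/1.py | solution
-- ===== SOURCE A (Python) =====
-- def solution(n):
--     answer = [0]
--     i = 0
--     while i < n - 1:
--         prev = answer[:]
--         answer.append(0)
--         for p in list(reversed(prev)):
--             if p == 0:
--                 answer.append(1)
--             else:
--                 answer.append(0)
--         i += 1
--     return answer
-- ===== SOURCE B (Python) =====
-- def solution(n):
--     if n <= 1:
--         return [0]
--     prev = solution(n - 1)
--     return prev + [0] + [1 - x for x in reversed(prev)]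
-- ===== Notes on version B (the rewrite author's own statement) =====
-- stated objective: simpler
-- what changed: Replaces the accumulating while-loop (copy, append, reversed scan with a branching complement) by direct recursion on the stage number, each stage being the previous stage, a separator bit, and the arithmetic complement of the reversed previous stage.
import Mathlib
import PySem

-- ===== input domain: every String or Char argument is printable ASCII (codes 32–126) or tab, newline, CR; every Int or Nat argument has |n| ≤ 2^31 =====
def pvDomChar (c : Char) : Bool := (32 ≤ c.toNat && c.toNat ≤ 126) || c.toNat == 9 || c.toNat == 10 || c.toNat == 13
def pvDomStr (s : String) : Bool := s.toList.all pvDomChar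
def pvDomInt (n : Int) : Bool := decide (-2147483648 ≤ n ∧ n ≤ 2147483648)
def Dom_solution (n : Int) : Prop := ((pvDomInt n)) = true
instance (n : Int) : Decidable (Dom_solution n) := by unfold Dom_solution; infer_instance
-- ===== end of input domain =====

-- B replaces A's accumulating while-loop by direct recursion on the stage number (simpler decomposition, same cost).
-- ===== PORT A =====
-- One iteration of A's while-loop body: copy answer, append 0, then append
-- the branch-complement of each element of the reversed copy.
def stepA (answer : List Int) : List Int :=
  (answer ++ [0]) ++ answer.reverse.map (fun p => if p = 0 then 1 else 0)

-- A's while-loop: runs while i < n-1, i.e. exactly (n-1).toNat times.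
def loopA : Nat → List Int → List Int
  | 0, answer => answer
  | k+1, answer => loopA k (stepA answer)

def solution (n : Int) : List Int := loopA (n - 1).toNat [0]

-- ===== PORT B =====
def solution_alt (n : Int) : List Int :=
  if n ≤ 1 then [0]
  else
    let prev := solution_alt (n - 1)
    prev ++ [0] ++ prev.reverse.map (fun x => 1 - x)
termination_by n.toNat
decreasing_by omega

-- ===== PRECONDITION & SPEC =====
def Spec_solution (n : Int) (out : List Int) : Prop := out = solution_alt n
instance (n : Int) (out : List Int) : Decidable (Spec_solution n out) := by unfold Spec_solution; infer_instance

-- ===== CLAIM (what is proved, stated in full; the proofs are below) =====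
def Claim_equal_solution : Prop := ∀ (n : Int), Dom_solution n → Spec_solution n (solution n)

-- ===== LEMMAS AND PROOFS =====

-- Every element produced is a 0/1 bit.
def Bits (l : List Int) : Prop := ∀ x ∈ l, x = 0 ∨ x = 1

theorem stepA_bits {l : List Int} (h : Bits l) : Bits (stepA l) := by
  intro x hx
  simp only [stepA, List.mem_append, List.mem_singleton, List.mem_map] at hx
  rcases hx with (hx | rfl) | ⟨y, hy, rfl⟩
  · exact h x hx
  · exact Or.inl rfl
  · rcases h y (List.mem_reverse.mp hy) with rfl | rfl <;> simp

-- On bit lists A's branch-complement equals B's 1 - x complement.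
theorem stepA_eq {l : List Int} (h : Bits l) :
    stepA l = l ++ [0] ++ l.reverse.map (fun x => 1 - x) := by
  unfold stepA
  congr 1
  apply List.map_congr_left
  intro x hx
  rcases h x (List.mem_reverse.mp hx) with rfl | rfl <;> simp

theorem loopA_step (k : Nat) (a : List Int) : loopA (k+1) a = stepA (loopA k a) := by
  induction k generalizing a with
  | zero => rfl
  | succ m ih => simpa [loopA] using ih (stepA a)

theorem loopA_bits (k : Nat) : Bits (loopA k [0]) := by
  induction k with
  | zero => intro x hx; simp [loopA] at hx; exact Or.inl hx
  | succ m ih => rw [loopA_step]; exact stepA_bits ih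

theorem altNat (k : Nat) : solution_alt ((k : Int) + 1) = loopA k [0] := by
  induction k with
  | zero => simp [solution_alt, loopA]
  | succ m ih =>
    rw [solution_alt, if_neg (by push_cast; omega), loopA_step]
    have h1 : ((((m : Nat) + 1 : Nat) : Int) + 1 - 1) = (m : Int) + 1 := by push_cast; ring
    rw [h1, ih, stepA_eq (loopA_bits m)]

-- ===== VERDICT (by name: the statement is the Claim_ definition above) =====
theorem solution_spec : Claim_equal_solution := by
  unfold Claim_equal_solution Spec_solution
  intro n _
  by_cases h : n ≤ 1
  · rw [solution_alt, if_pos h]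
    simp [solution, Int.toNat_of_nonpos (by omega : n - 1 ≤ 0), loopA]
  · have hn : n = ((n - 1).toNat : Int) + 1 := by omega
    rw [solution, hn, altNat]
    congr 1
    omega
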